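-- pv_equiv track=rewrite | github.com/TarekMohame-d/valorant_wiki_webscraping | valorant_wiki_webscraper.py | prepare_data_for_update
-- ===== SOURCE A (Python) =====
-- def prepare_data_for_update(data):
--     """Prepare data in a format suitable for batch updating into Google Sheets."""
--     headers = ["audio_links", "quotes"]
--     rows = []
--
--     for item in data:
--         audio_links = item["audio_links"]
--         quotes = item["quotes"]
--         max_length = max(len(audio_links), len(quotes))
--         for i in range(max_length):
--             row = [
--                 audio_links[i] if i < len(audio_links) else "",
--                 quotes[i] if i < len(quotes) else "",
--             ]
--             rows.append(row)
--
--     return [headers] + rows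
-- ===== SOURCE B (Python) =====
-- def prepare_data_for_update(data):
--     """Prepare data in a format suitable for batch updating into Google Sheets."""
--     rows = [["audio_links", "quotes"]]
--     for item in data:
--         # stage 1: skeleton rows from the audio column, quotes blank
--         base = len(rows)
--         rows.extend([a, ""] for a in item["audio_links"])
--         # stage 2: patch quotes into the skeleton, extending when it runs out
--         for i, q in enumerate(item["quotes"]):
--             if base + i < len(rows):
--                 rows[base + i][1] = q
--             else:
--                 rows.append(["", q])
--     return rows
-- ===== Notes on version B (the rewrite author's own statement) =====
-- stated objective: alternative
-- what changed: B builds each item's block in two staged passes - first a skeleton row [a, ''] per audio link, then a second pass that patches each quote into the skeleton's second column in place, appending ['', q] rows once the skeleton is exhausted - instead of A's single max_length index loop with i<len bounds checks.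
import Mathlib
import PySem

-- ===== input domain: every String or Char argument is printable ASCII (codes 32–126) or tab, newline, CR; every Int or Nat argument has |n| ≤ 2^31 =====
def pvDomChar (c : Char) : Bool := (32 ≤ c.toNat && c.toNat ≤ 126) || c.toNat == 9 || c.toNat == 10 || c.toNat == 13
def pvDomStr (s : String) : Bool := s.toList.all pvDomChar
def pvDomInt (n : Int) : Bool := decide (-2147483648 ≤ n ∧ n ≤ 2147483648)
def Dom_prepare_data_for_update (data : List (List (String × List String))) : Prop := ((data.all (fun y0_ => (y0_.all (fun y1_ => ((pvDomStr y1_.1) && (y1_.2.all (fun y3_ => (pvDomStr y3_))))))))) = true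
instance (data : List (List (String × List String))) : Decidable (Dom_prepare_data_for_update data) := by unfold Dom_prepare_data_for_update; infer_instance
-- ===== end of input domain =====

-- B builds each item's block in two staged passes — a [a, ""] skeleton from the audio column,
-- then an in-place patch of the quotes into column 1, extending past the skeleton — instead of
-- A's single max_length index loop with bounds checks (alternative decomposition; same cost).
-- Return value only is compared (B mutates its local rows list; the argument is untouched).

-- item[k]: first-match association lookup (Python dict lookup); Pre_ guarantees the key is present.
def pyItemGet (item : List (String × List String)) (k : String) : List String :=
  (((item.find? (fun p => p.1 == k)).map Prod.snd).getD [])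

-- ===== PORT A =====
def prepare_data_for_update (data : List (List (String × List String))) : List (List String) :=
  let rows : List (List String) :=
    data.foldl (fun rows item =>
      let audio_links := pyItemGet item "audio_links"
      let quotes := pyItemGet item "quotes"
      let max_length : Int := max (audio_links.length : Int) (quotes.length : Int)
      (PySem.List.pyRange 0 max_length 1).foldl (fun rows i =>
        rows ++ [[if i < (audio_links.length : Int) then PySem.List.pyGetD audio_links i "" else "",
                  if i < (quotes.length : Int) then PySem.List.pyGetD quotes i "" else ""]]) rows) []
  [["audio_links", "quotes"]] ++ rows

-- ===== PORT B =====
-- rows[base+i][1] = q is ported as a functional set of the 2-element row (keep column 0, replace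
-- column 1); base + i is nonnegative by construction (enumerate indices start at 0), so .toNat is exact.
def prepare_data_for_update_alt (data : List (List (String × List String))) : List (List String) :=
  data.foldl (fun rows item =>
    let base := rows.length
    let rows := rows ++ (pyItemGet item "audio_links").map (fun a => [a, ""])
    (PySem.List.enumerate (pyItemGet item "quotes") 0).foldl (fun rows p =>
      if (base : Int) + p.1 < (rows.length : Int) then
        let n := ((base : Int) + p.1).toNat
        rows.set n [(rows.getD n []).headD "", p.2]
      else rows ++ [["", p.2]]) rows) [["audio_links", "quotes"]]

-- ===== PRECONDITION & SPEC =====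
-- Pre_: every item carries both keys; A raises KeyError on a missing key.
def Pre_prepare_data_for_update (data : List (List (String × List String))) : Prop :=
  ∀ item ∈ data, (item.find? (fun p => p.1 == "audio_links")).isSome ∧
                 (item.find? (fun p => p.1 == "quotes")).isSome
instance (data : List (List (String × List String))) : Decidable (Pre_prepare_data_for_update data) := by unfold Pre_prepare_data_for_update; infer_instance

def pvWitness_prepare_data_for_update : (List (List (String × List String))) :=
  [[("audio_links", ["a1", "a2"]), ("quotes", ["q1"])]]

def Spec_prepare_data_for_update (data : List (List (String × List String))) (out : List (List String)) : Prop := out = prepare_data_for_update_alt data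
instance (data : List (List (String × List String))) (out : List (List String)) : Decidable (Spec_prepare_data_for_update data out) := by unfold Spec_prepare_data_for_update; infer_instance

-- ===== CLAIM (what is proved, stated in full; the proofs are below) =====
def Claim_equal_prepare_data_for_update : Prop := ∀ (data : List (List (String × List String))), Dom_prepare_data_for_update data → Pre_prepare_data_for_update data → Spec_prepare_data_for_update data (prepare_data_for_update data)

-- ===== LEMMAS AND PROOFS =====

-- canonical per-item block: pair off the common prefix, then the overhang of either list
def pvPadRows : List String → List String → List (List String)
  | [], [] => []
  | a :: al, [] => [a, ""] :: pvPadRows al []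
  | [], q :: qs => ["", q] :: pvPadRows [] qs
  | a :: al, q :: qs => [a, q] :: pvPadRows al qs

lemma pvPadRows_nil_right (al : List String) :
    pvPadRows al [] = al.map (fun a => [a, ""]) := by
  induction al with
  | nil => simp [pvPadRows]
  | cons a al ih => simp [pvPadRows, ih]

-- A's index loop over range(max_length) equals the padded zip of the two columns
lemma item_rows_zip (al qs : List String) :
    (PySem.List.pyRange 0 (max (al.length : Int) (qs.length : Int)) 1).map (fun i =>
        [if i < (al.length : Int) then PySem.List.pyGetD al i "" else "",
         if i < (qs.length : Int) then PySem.List.pyGetD qs i "" else ""])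
    = ((al ++ List.replicate (qs.length - al.length) "").zip
       (qs ++ List.replicate (al.length - qs.length) "")).map (fun p => [p.1, p.2]) := by
  have hm : (max (al.length : Int) (qs.length : Int)) = ((max al.length qs.length : Nat) : Int) := by
    push_cast; ring_nf
  rw [hm, PySem.List.pyRange_zero_natCast, List.map_map]
  apply List.ext_getElem
  · simp [List.length_zip]; omega
  · intro j hj hj'
    have hjL : j < max al.length qs.length := by simpa using hj
    simp only [List.getElem_map, Function.comp, List.getElem_range, List.getElem_zip,
      PySem.List.pyGetD_natCast]
    have hA : (al ++ List.replicate (qs.length - al.length) "")[j]'(by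
          rw [List.length_append, List.length_replicate]; omega)
        = if j < al.length then al.getD j "" else "" := by
      rw [List.getElem_append]
      split_ifs with h
      · simp [List.getD, h]
      · simp
    have hQ : (qs ++ List.replicate (al.length - qs.length) "")[j]'(by
          rw [List.length_append, List.length_replicate]; omega)
        = if j < qs.length then qs.getD j "" else "" := by
      rw [List.getElem_append]
      split_ifs with h
      · simp [List.getD, h]
      · simp
    rw [hA, hQ]
    simp only [Nat.cast_lt]

-- the padded zip is pvPadRows
lemma zip_pad_eq (al : List String) : ∀ qs : List String,
    ((al ++ List.replicate (qs.length - al.length) "").zip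
     (qs ++ List.replicate (al.length - qs.length) "")).map (fun p => [p.1, p.2])
    = pvPadRows al qs := by
  induction al with
  | nil =>
    intro qs
    induction qs with
    | nil => simp [pvPadRows]
    | cons q qs ihq =>
      simp only [List.length_nil, Nat.sub_zero, List.length_cons, List.replicate_succ,
        Nat.zero_sub, List.replicate_zero, List.append_nil, List.nil_append] at ihq ⊢
      simp [pvPadRows, List.zip_cons_cons, ihq]
  | cons a al ih =>
    intro qs
    cases qs with
    | nil =>
      simp only [List.length_nil, List.length_cons, Nat.zero_sub, List.replicate_zero,
        List.append_nil, Nat.sub_zero, List.replicate_succ, List.nil_append]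
      simpa [pvPadRows, List.zip_cons_cons, pvPadRows_nil_right] using ih []
    | cons q qs =>
      simp only [List.length_cons, Nat.succ_sub_succ]
      simp [pvPadRows, List.zip_cons_cons, ih qs]

-- B's patch loop: folding the enumerated quotes over pre ++ skeleton yields pre ++ pvPadRows
lemma patch_go (base : Nat) (qs : List String) : ∀ (al : List String) (s : Int)
    (pre : List (List String)), (base : Int) + s = (pre.length : Int) →
    (PySem.List.enumerate qs s).foldl (fun rows p =>
      if (base : Int) + p.1 < (rows.length : Int) then
        let n := ((base : Int) + p.1).toNat
        rows.set n [(rows.getD n []).headD "", p.2]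
      else rows ++ [["", p.2]]) (pre ++ al.map (fun a => [a, ""]))
    = pre ++ pvPadRows al qs := by
  induction qs with
  | nil =>
    intro al s pre _
    simp [PySem.List.enumerate, pvPadRows_nil_right]
  | cons q qs ih =>
    intro al s pre hlen
    rw [PySem.List.enumerate_cons, List.foldl_cons]
    cases al with
    | nil =>
      have hcond : ¬ ((base : Int) + s < ((pre ++ (List.map (fun a => [a, ""]) [])).length : Int)) := by
        simp; omega
      rw [if_neg hcond]
      have := ih [] (s + 1) (pre ++ [["", q]]) (by simp; omega)
      simp only [List.map_nil, List.append_nil] at this ⊢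
      rw [this]
      simp [pvPadRows]
    | cons a al =>
      have hcond : (base : Int) + s < ((pre ++ (List.map (fun a => [a, ""]) (a :: al))).length : Int) := by
        simp; omega
      rw [if_pos hcond]
      have hn : ((base : Int) + s).toNat = pre.length := by omega
      have hget : (pre ++ List.map (fun a => [a, ""]) (a :: al)).getD pre.length [] = [a, ""] := by
        simp [List.getD]
      have hset : (pre ++ List.map (fun a => [a, ""]) (a :: al)).set pre.length [a, q]
          = (pre ++ [[a, q]]) ++ List.map (fun a => [a, ""]) al := by
        rw [List.map_cons, List.set_append_right _ _ (le_refl _)]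
        simp
      simp only [hn, hget]
      have hrow : [([a, ""] : List String).headD "", q] = [a, q] := rfl
      rw [hrow, hset]
      rw [ih al (s + 1) (pre ++ [[a, q]]) (by simp; omega)]
      simp [pvPadRows]

-- per-item steps of both ports append the same block
lemma stepA_eq (rows : List (List String)) (item : List (String × List String)) :
    (PySem.List.pyRange 0 (max ((pyItemGet item "audio_links").length : Int)
        ((pyItemGet item "quotes").length : Int)) 1).foldl (fun rows i =>
      rows ++ [[if i < ((pyItemGet item "audio_links").length : Int)
                  then PySem.List.pyGetD (pyItemGet item "audio_links") i "" else "",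
                if i < ((pyItemGet item "quotes").length : Int)
                  then PySem.List.pyGetD (pyItemGet item "quotes") i "" else ""]]) rows
    = rows ++ pvPadRows (pyItemGet item "audio_links") (pyItemGet item "quotes") := by
  rw [PySem.List.foldl_append_singleton_eq_map, item_rows_zip, zip_pad_eq]

theorem prepare_data_for_update_eq (data : List (List (String × List String))) :
    prepare_data_for_update data = prepare_data_for_update_alt data := by
  simp only [prepare_data_for_update, prepare_data_for_update_alt]
  have hfa : (fun (rows : List (List String)) (item : List (String × List String)) =>
      let audio_links := pyItemGet item "audio_links"
      let quotes := pyItemGet item "quotes"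
      let max_length : Int := max (audio_links.length : Int) (quotes.length : Int)
      (PySem.List.pyRange 0 max_length 1).foldl (fun rows i =>
        rows ++ [[if i < (audio_links.length : Int) then PySem.List.pyGetD audio_links i "" else "",
                  if i < (quotes.length : Int) then PySem.List.pyGetD quotes i "" else ""]]) rows)
      = fun rows item => rows ++ pvPadRows (pyItemGet item "audio_links") (pyItemGet item "quotes") := by
    funext rows item
    exact stepA_eq rows item
  have hfb : (fun (rows : List (List String)) (item : List (String × List String)) =>
      let base := rows.length
      let rows := rows ++ (pyItemGet item "audio_links").map (fun a => [a, ""])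
      (PySem.List.enumerate (pyItemGet item "quotes") 0).foldl (fun rows p =>
        if (base : Int) + p.1 < (rows.length : Int) then
          let n := ((base : Int) + p.1).toNat
          rows.set n [(rows.getD n []).headD "", p.2]
        else rows ++ [["", p.2]]) rows)
      = fun rows item => rows ++ pvPadRows (pyItemGet item "audio_links") (pyItemGet item "quotes") := by
    funext rows item
    exact patch_go rows.length (pyItemGet item "quotes") (pyItemGet item "audio_links") 0 rows (by simp)
  rw [hfa, hfb, PySem.List.foldl_append_eq_flatMap, PySem.List.foldl_append_eq_flatMap]
  rfl

-- ===== VERDICT (by name: the statement is the Claim_ definition above) =====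
theorem prepare_data_for_update_spec : Claim_equal_prepare_data_for_update := by
  intro data _ _
  exact prepare_data_for_update_eq data
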